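-- pv_equiv track=rewrite | github.com/ovsrobot/dpdk | devtools/analyze-patch.py | extract_commit_messages
-- ===== SOURCE A (Python) =====
-- def split_mbox_patches(content):
--     """Split an mbox file into individual patches."""
--     patches = []
--     current_patch = []
--     in_patch = False
--
--     for line in content.split("\n"):
--         # Detect start of new message in mbox format
--         if line.startswith("From ") and (
--             " Mon " in line
--             or " Tue " in line
--             or " Wed " in line
--             or " Thu " in line
--             or " Fri " in line
--             or " Sat " in line
--             or " Sun " in line
--         ):
--             if current_patch:
--                 patches.append("\n".join(current_patch))
--             current_patch = [line]
--             in_patch = True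
--         elif in_patch:
--             current_patch.append(line)
--
--     # Don't forget the last patch
--     if current_patch:
--         patches.append("\n".join(current_patch))
--
--     return patches if patches else [content]
--
-- def extract_commit_messages(content):
--     """Extract only commit messages from patch content."""
--     patches = split_mbox_patches(content)
--     messages = []
--
--     for patch in patches:
--         lines = patch.split("\n")
--         msg_lines = []
--         in_headers = True
--         in_body = False
--         found_subject = False
--
--         for line in lines:
--             # Collect headers we care about
--             if in_headers:
--                 if line.startswith("Subject:"):
--                     msg_lines.append(line)
--                     found_subject = True
--                 elif line.startswith(("From:", "Date:")):
--                     msg_lines.append(line)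
--                 elif line.startswith((" ", "\t")) and found_subject:
--                     # Subject continuation
--                     msg_lines.append(line)
--                 elif line == "":
--                     if found_subject:
--                         in_headers = False
--                         in_body = True
--                         msg_lines.append("")
--             elif in_body:
--                 # Stop at the diff
--                 if line.startswith("---") and not line.startswith("----"):
--                     break
--                 if line.startswith("diff --git"):
--                     break
--                 msg_lines.append(line)
--
--         if msg_lines:
--             messages.append("\n".join(msg_lines))
--
--     return "\n\n---\n\n".join(messages)
-- ===== SOURCE B (Python) =====
-- def split_mbox_patches(content):
--     """Split an mbox file into individual patches."""
--     patches = []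
--     current_patch = []
--     in_patch = False
--
--     for line in content.split("\n"):
--         if line.startswith("From ") and (
--             " Mon " in line
--             or " Tue " in line
--             or " Wed " in line
--             or " Thu " in line
--             or " Fri " in line
--             or " Sat " in line
--             or " Sun " in line
--         ):
--             if current_patch:
--                 patches.append("\n".join(current_patch))
--             current_patch = [line]
--             in_patch = True
--         elif in_patch:
--             current_patch.append(line)
--
--     if current_patch:
--         patches.append("\n".join(current_patch))
--
--     return patches if patches else [content]
--
--
-- def _split_before(lines, pred):
--     """Split lines at the first line satisfying pred: (before, hit, after), or None."""
--     for i, line in enumerate(lines):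
--         if pred(line):
--             return lines[:i], line, lines[i + 1:]
--     return None
--
--
-- def _keep_header(line):
--     return line.startswith(("Subject:", "From:", "Date:", " ", "\t"))
--
--
-- def _body_until_diff(lines):
--     out = []
--     for line in lines:
--         if (line.startswith("---") and not line.startswith("----")) or line.startswith("diff --git"):
--             break
--         out.append(line)
--     return out
--
--
-- def _message(lines):
--     sp = _split_before(lines, lambda l: l.startswith("Subject:"))
--     if sp is None:
--         # No subject: only From:/Date: headers are ever collected.
--         return [l for l in lines if l.startswith(("From:", "Date:"))]
--     pre, subject, rest = sp
--     head = [l for l in pre if l.startswith(("From:", "Date:"))]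
--     bp = _split_before(rest, lambda l: l == "")
--     if bp is None:
--         return head + [subject] + [l for l in rest if _keep_header(l)]
--     mid, _, body = bp
--     return (head + [subject] + [l for l in mid if _keep_header(l)] + [""]
--             + _body_until_diff(body))
--
--
-- def extract_commit_messages(content):
--     """Extract only commit messages from patch content."""
--     msgs = [m for m in (_message(p.split("\n")) for p in split_mbox_patches(content)) if m]
--     return "\n\n---\n\n".join("\n".join(m) for m in msgs)
-- ===== Notes on version B (the rewrite author's own statement) =====
-- stated objective: alternative
-- what changed: Replaces A's per-line four-flag (in_headers/in_body/found_subject) state machine by a slice-based decomposition: split each patch's lines at the first subject-header line and at the first blank line after it, then independently filter the three segments (sender/date prefix, header-and-continuation middle, body up to the diff marker) and concatenate.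
import Mathlib
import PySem

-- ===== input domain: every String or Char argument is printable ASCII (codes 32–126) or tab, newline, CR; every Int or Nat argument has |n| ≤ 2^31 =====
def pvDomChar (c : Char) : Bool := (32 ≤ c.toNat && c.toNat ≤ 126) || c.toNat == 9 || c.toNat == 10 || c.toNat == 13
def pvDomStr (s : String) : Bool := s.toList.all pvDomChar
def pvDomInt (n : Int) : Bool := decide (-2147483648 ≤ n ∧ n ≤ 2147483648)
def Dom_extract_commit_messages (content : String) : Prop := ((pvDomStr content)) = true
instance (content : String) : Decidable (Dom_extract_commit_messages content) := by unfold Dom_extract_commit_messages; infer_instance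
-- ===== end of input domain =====

-- B replaces A's four-flag header/body state machine by a slice-based decomposition: split the
-- lines at the first subject-header line and at the first blank line after it, then filter/take
-- each segment independently (objective: alternative decomposition; same cost).

-- ===== PORT A =====
-- s.split("\n"): split? is none only for sep = "", so getD is exact here
def pvSplitNL (s : String) : List String := (PySem.Str.split? s "\n").getD []

-- shared helper: split_mbox_patches is the identical function in Source A and Source B
def pvIsMboxFrom (line : String) : Bool :=
  PySem.Str.startswith line "From " &&
    (PySem.Str.isIn " Mon " line || PySem.Str.isIn " Tue " line || PySem.Str.isIn " Wed " line ||
     PySem.Str.isIn " Thu " line || PySem.Str.isIn " Fri " line || PySem.Str.isIn " Sat " line ||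
     PySem.Str.isIn " Sun " line)

def split_mbox_patches (content : String) : List String :=
  let st := (pvSplitNL content).foldl
    (fun (st : List String × List String × Bool) line =>
      let (patches, current_patch, in_patch) := st
      if pvIsMboxFrom line then
        ((if current_patch.isEmpty then patches
          else patches ++ [PySem.Str.join "\n" current_patch]), [line], true)
      else if in_patch then (patches, current_patch ++ [line], in_patch)
      else (patches, current_patch, in_patch))
    ([], [], false)
  let patches := if st.2.1.isEmpty then st.1 else st.1 ++ [PySem.Str.join "\n" st.2.1]
  if patches.isEmpty then [content] else patches

-- A's inner per-patch loop (the 'break' in the body phase makes it a structural recursion over the same state)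
def pvALoop : List String → Bool → Bool → Bool → List String → List String
  | [], _, _, _, msg => msg
  | line :: ls, in_headers, in_body, fs, msg =>
    if in_headers then
      if PySem.Str.startswith line "Subject:" then pvALoop ls in_headers in_body true (msg ++ [line])
      else if PySem.Str.startswith line "From:" || PySem.Str.startswith line "Date:" then
        pvALoop ls in_headers in_body fs (msg ++ [line])
      else if (PySem.Str.startswith line " " || PySem.Str.startswith line "\t") && fs then
        pvALoop ls in_headers in_body fs (msg ++ [line])
      else if line == "" then
        if fs then pvALoop ls false true fs (msg ++ [""])
        else pvALoop ls in_headers in_body fs msg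
      else pvALoop ls in_headers in_body fs msg
    else if in_body then
      if PySem.Str.startswith line "---" && !PySem.Str.startswith line "----" then msg
      else if PySem.Str.startswith line "diff --git" then msg
      else pvALoop ls in_headers in_body fs (msg ++ [line])
    else pvALoop ls in_headers in_body fs msg

def extract_commit_messages (content : String) : String :=
  let patches := split_mbox_patches content
  let messages := patches.foldl
    (fun messages patch =>
      let msg := pvALoop (pvSplitNL patch) true false false []
      if msg.isEmpty then messages else messages ++ [PySem.Str.join "\n" msg])
    []
  PySem.Str.join "\n\n---\n\n" messages

-- ===== PORT B =====
def pvSplitBefore (p : String → Bool) : List String → Option (List String × String × List String)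
  | [] => none
  | l :: ls =>
    if p l then some ([], l, ls)
    else (pvSplitBefore p ls).map (fun x => (l :: x.1, x.2.1, x.2.2))

def pvIsFD (l : String) : Bool :=
  PySem.Str.startswith l "From:" || PySem.Str.startswith l "Date:"

def pvKeepHeader (l : String) : Bool :=
  PySem.Str.startswith l "Subject:" || PySem.Str.startswith l "From:" ||
  PySem.Str.startswith l "Date:" || PySem.Str.startswith l " " || PySem.Str.startswith l "\t"

def pvBodyUntilDiff : List String → List String
  | [] => []
  | l :: ls =>
    if (PySem.Str.startswith l "---" && !PySem.Str.startswith l "----") ||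
        PySem.Str.startswith l "diff --git" then []
    else l :: pvBodyUntilDiff ls

def pvMessage (lines : List String) : List String :=
  match pvSplitBefore (fun l => PySem.Str.startswith l "Subject:") lines with
  | none => lines.filter pvIsFD
  | some (pre, subject, rest) =>
    let head := pre.filter pvIsFD
    match pvSplitBefore (fun l => l == "") rest with
    | none => head ++ [subject] ++ rest.filter pvKeepHeader
    | some (mid, _, body) =>
      head ++ [subject] ++ mid.filter pvKeepHeader ++ [""] ++ pvBodyUntilDiff body

def extract_commit_messages_alt (content : String) : String :=
  let msgs := ((split_mbox_patches content).map
      (fun p => pvMessage (pvSplitNL p))).filter (fun m => !m.isEmpty)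
  PySem.Str.join "\n\n---\n\n" (msgs.map (PySem.Str.join "\n"))

-- ===== PRECONDITION & SPEC =====
def Spec_extract_commit_messages (content : String) (out : String) : Prop := out = extract_commit_messages_alt content
instance (content : String) (out : String) : Decidable (Spec_extract_commit_messages content out) := by unfold Spec_extract_commit_messages; infer_instance

-- ===== CLAIM (what is proved, stated in full; the proofs are below) =====
def Claim_equal_extract_commit_messages : Prop := ∀ (content : String), Dom_extract_commit_messages content → Spec_extract_commit_messages content (extract_commit_messages content)

-- ===== LEMMAS AND PROOFS =====

theorem pvALoop_acc (ls : List String) : ∀ (h b fs : Bool) (msg : List String),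
    pvALoop ls h b fs msg = msg ++ pvALoop ls h b fs [] := by
  induction ls with
  | nil => intro h b fs msg; simp [pvALoop]
  | cons l ls ih =>
    intro h b fs msg
    simp only [pvALoop, List.nil_append]
    split_ifs <;>
      first
      | simp
      | exact ih _ _ _ msg
      | (rw [ih _ _ _ (msg ++ [l]), ih _ _ _ [l]]; simp)
      | (rw [ih _ _ _ (msg ++ [""]), ih _ _ _ [""]]; simp)

theorem pvSplitBefore_none {p : String → Bool} {ls : List String}
    (h : pvSplitBefore p ls = none) : ∀ l ∈ ls, p l = false := by
  induction ls with
  | nil => simp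
  | cons l ls ih =>
    simp only [pvSplitBefore] at h
    by_cases hp : p l
    · simp [hp] at h
    · intro x hx
      rcases List.mem_cons.mp hx with hx | hx
      · simpa [hx] using hp
      · cases hsb : pvSplitBefore p ls with
        | none => exact ih hsb x hx
        | some v => rw [if_neg hp, hsb] at h; simp at h

theorem pvSplitBefore_some {p : String → Bool} {ls a : List String} {x : String} {b : List String}
    (h : pvSplitBefore p ls = some (a, x, b)) :
    ls = a ++ x :: b ∧ p x = true ∧ ∀ l ∈ a, p l = false := by
  induction ls generalizing a x b with
  | nil => simp [pvSplitBefore] at h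
  | cons l ls ih =>
    simp only [pvSplitBefore] at h
    by_cases hp : p l
    · rw [if_pos hp] at h
      simp only [Option.some.injEq, Prod.mk.injEq] at h
      obtain ⟨h1, h2, h3⟩ := h
      subst h1; subst h2; subst h3
      exact ⟨rfl, hp, by simp⟩
    · cases hsb : pvSplitBefore p ls with
      | none => rw [if_neg hp, hsb] at h; simp at h
      | some v =>
        obtain ⟨a', x', b'⟩ := v
        rw [if_neg hp, hsb] at h
        simp only [Option.map_some, Option.some.injEq, Prod.mk.injEq] at h
        obtain ⟨h1, h2, h3⟩ := h
        subst h1; subst h2; subst h3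
        obtain ⟨hls, hpx, hpre⟩ := ih hsb
        refine ⟨by simp [hls], hpx, ?_⟩
        intro y hy
        rcases List.mem_cons.mp hy with hy | hy
        · simpa [hy] using hp
        · exact hpre y hy

-- one step of A's loop, phrased as B's per-line filters
theorem pvALoop_cons_true (l : String) (ls : List String) (hl : (l == "") = false) :
    pvALoop (l :: ls) true false true [] =
      (if pvKeepHeader l then [l] else []) ++ pvALoop ls true false true [] := by
  by_cases hS : PySem.Str.startswith l "Subject:" = true
  · simp only [pvALoop, pvKeepHeader, hS]
    simp [pvALoop_acc ls true false true [l]]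
  · simp only [Bool.not_eq_true] at hS
    by_cases hF : PySem.Str.startswith l "From:" = true
    · simp only [pvALoop, pvKeepHeader, hS, hF]
      simp [pvALoop_acc ls true false true [l]]
    · simp only [Bool.not_eq_true] at hF
      by_cases hD : PySem.Str.startswith l "Date:" = true
      · simp only [pvALoop, pvKeepHeader, hS, hF, hD]
        simp [pvALoop_acc ls true false true [l]]
      · simp only [Bool.not_eq_true] at hD
        by_cases hsp : PySem.Str.startswith l " " = true
        · simp only [pvALoop, pvKeepHeader, hS, hF, hD, hsp]
          simp [pvALoop_acc ls true false true [l]]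
        · simp only [Bool.not_eq_true] at hsp
          by_cases ht : PySem.Str.startswith l "\t" = true
          · simp only [pvALoop, pvKeepHeader, hS, hF, hD, hsp, ht]
            simp [pvALoop_acc ls true false true [l]]
          · simp only [Bool.not_eq_true] at ht
            simp only [pvALoop, pvKeepHeader, hS, hF, hD, hsp, ht, hl]
            simp

theorem pvALoop_cons_false (l : String) (ls : List String)
    (hS : PySem.Str.startswith l "Subject:" = false) :
    pvALoop (l :: ls) true false false [] =
      (if pvIsFD l then [l] else []) ++ pvALoop ls true false false [] := by
  by_cases hF : PySem.Str.startswith l "From:" = true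
  · simp only [pvALoop, pvIsFD, hS, hF]
    simp [pvALoop_acc ls true false false [l]]
  · simp only [Bool.not_eq_true] at hF
    by_cases hD : PySem.Str.startswith l "Date:" = true
    · simp only [pvALoop, pvIsFD, hS, hF, hD]
      simp [pvALoop_acc ls true false false [l]]
    · simp only [Bool.not_eq_true] at hD
      cases hb : (l == "") with
      | true =>
        simp only [pvALoop, pvIsFD, hS, hF, hD, hb]
        simp
      | false =>
        simp only [pvALoop, pvIsFD, hS, hF, hD, hb]
        simp

theorem pvALoop_body (ls : List String) :
    pvALoop ls false true true [] = pvBodyUntilDiff ls := by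
  induction ls with
  | nil => rfl
  | cons l ls ih =>
    cases hA : (PySem.Str.startswith l "---" && !PySem.Str.startswith l "----") with
    | true =>
      simp only [pvALoop, pvBodyUntilDiff, hA]
      simp
    | false =>
      cases hd : PySem.Str.startswith l "diff --git" with
      | true =>
        simp only [pvALoop, pvBodyUntilDiff, hA, hd]
        simp
      | false =>
        simp only [pvALoop, pvBodyUntilDiff, hA, hd]
        simp [pvALoop_acc ls false true true [l], ih]

theorem pvALoop_noblank {ls : List String} (hnb : ∀ l ∈ ls, l ≠ "") :
    pvALoop ls true false true [] = ls.filter pvKeepHeader := by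
  induction ls with
  | nil => rfl
  | cons l ls ih =>
    have hl : (l == "") = false := by simpa using hnb l (by simp)
    rw [pvALoop_cons_true l ls hl, ih (fun x hx => hnb x (by simp [hx])), List.filter_cons]
    cases h : pvKeepHeader l <;> simp

theorem pvALoop_mid {mid : List String} (body : List String) (hnb : ∀ l ∈ mid, l ≠ "") :
    pvALoop (mid ++ "" :: body) true false true [] =
      mid.filter pvKeepHeader ++ [""] ++ pvBodyUntilDiff body := by
  induction mid with
  | nil =>
    have e1 : PySem.Str.startswith "" "Subject:" = false := by decide
    have e2 : PySem.Str.startswith "" "From:" = false := by decide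
    have e3 : PySem.Str.startswith "" "Date:" = false := by decide
    have e4 : PySem.Str.startswith "" " " = false := by decide
    have e5 : PySem.Str.startswith "" "\t" = false := by decide
    simp only [List.nil_append, pvALoop, e1, e2, e3, e4, e5]
    simp [pvALoop_acc body false true true [""], pvALoop_body]
  | cons l mid ih =>
    have hl : (l == "") = false := by simpa using hnb l (by simp)
    rw [List.cons_append, pvALoop_cons_true l (mid ++ "" :: body) hl,
      ih (fun x hx => hnb x (by simp [hx])), List.filter_cons]
    cases h : pvKeepHeader l <;> simp

theorem pvALoop_pre {pre : List String} (x : List String)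
    (hns : ∀ l ∈ pre, PySem.Str.startswith l "Subject:" = false) :
    pvALoop (pre ++ x) true false false [] = pre.filter pvIsFD ++ pvALoop x true false false [] := by
  induction pre with
  | nil => simp
  | cons l pre ih =>
    rw [List.cons_append, pvALoop_cons_false l (pre ++ x) (hns l (by simp)),
      ih (fun y hy => hns y (by simp [hy])), List.filter_cons]
    cases h : pvIsFD l <;> simp

theorem pvMessage_eq (lines : List String) :
    pvALoop lines true false false [] = pvMessage lines := by
  unfold pvMessage
  cases hs : pvSplitBefore (fun l => PySem.Str.startswith l "Subject:") lines with
  | none =>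
    have hns := pvSplitBefore_none hs
    have h := pvALoop_pre (pre := lines) [] (fun l hl => hns l hl)
    simpa [pvALoop] using h
  | some v =>
    obtain ⟨pre, subject, rest⟩ := v
    obtain ⟨hls, hsub, hpre⟩ := pvSplitBefore_some hs
    subst hls
    rw [pvALoop_pre (subject :: rest) hpre]
    have hsub' : PySem.Str.startswith subject "Subject:" = true := hsub
    have hstep : pvALoop (subject :: rest) true false false [] =
        subject :: pvALoop rest true false true [] := by
      simp only [pvALoop, hsub', if_pos, List.nil_append]
      rw [pvALoop_acc rest true false true [subject]]
      rfl
    rw [hstep]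
    cases hb : pvSplitBefore (fun l => l == "") rest with
    | none =>
      have hnb := pvSplitBefore_none hb
      rw [pvALoop_noblank (fun l hl => by simpa using hnb l hl)]
      simp [hb]
    | some w =>
      obtain ⟨mid, blank, body⟩ := w
      obtain ⟨hr, hbl, hmid⟩ := pvSplitBefore_some hb
      have hbl' : blank = "" := by simpa using hbl
      subst hbl'
      subst hr
      rw [pvALoop_mid body (fun l hl => by simpa using hmid l hl)]
      simp [hb]

theorem pvOuter (ps : List String) (acc : List String) :
    ps.foldl
      (fun messages patch =>
        let msg := pvALoop (pvSplitNL patch) true false false []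
        if msg.isEmpty then messages else messages ++ [PySem.Str.join "\n" msg]) acc
    = acc ++ ((ps.map (fun p => pvMessage (pvSplitNL p))).filter
        (fun m => !m.isEmpty)).map (PySem.Str.join "\n") := by
  induction ps generalizing acc with
  | nil => simp
  | cons p ps ih =>
    rw [List.foldl_cons, ih]
    by_cases hm : (pvMessage (pvSplitNL p)).isEmpty
    · simp [pvMessage_eq, hm]
    · simp [pvMessage_eq, hm]

-- ===== VERDICT (by name: the statement is the Claim_ definition above) =====
theorem extract_commit_messages_spec : Claim_equal_extract_commit_messages := by
  intro content _
  unfold Spec_extract_commit_messages extract_commit_messages extract_commit_messages_alt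
  simp only [pvOuter, List.nil_append]
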